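-- pv_equiv track=rewrite | github.com/somm12/codingTest | 36주차/혼자서하는틱택토.py | count
-- ===== SOURCE A (Python) =====
-- def count(board):
--     a = 0
--     b = 0
--     for arr in board:
--         for v in arr:
--             if v == 'O':
--                 a += 1
--             elif v == 'X':
--                 b += 1
--     return (a,b)
-- ===== SOURCE B (Python) =====
-- def count(board):
--     flat = [v for arr in board for v in arr]
--     return (flat.count('O'), flat.count('X'))
-- ===== Notes on version B (the rewrite author's own statement) =====
-- stated objective: idiomatic
-- what changed: B flattens the board once and uses two independent list.count scans instead of A's single accumulator loop with elif branches.
import Mathlib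
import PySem

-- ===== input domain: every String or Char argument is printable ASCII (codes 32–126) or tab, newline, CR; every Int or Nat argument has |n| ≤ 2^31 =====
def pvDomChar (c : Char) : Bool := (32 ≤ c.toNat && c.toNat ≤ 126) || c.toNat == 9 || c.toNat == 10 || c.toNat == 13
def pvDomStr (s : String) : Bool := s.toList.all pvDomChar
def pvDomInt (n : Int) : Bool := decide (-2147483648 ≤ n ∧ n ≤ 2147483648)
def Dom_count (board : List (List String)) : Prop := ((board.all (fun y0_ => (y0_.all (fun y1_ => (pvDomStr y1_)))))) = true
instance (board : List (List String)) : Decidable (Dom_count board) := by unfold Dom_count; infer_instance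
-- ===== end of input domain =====

-- B flattens the board into one list and tallies the two symbols with two list.count scans; idiomatic, same O(n) cost as A.


-- ===== PORT A =====
def count (board : List (List String)) : Int × Int :=
  board.foldl (fun ab arr =>
    arr.foldl (fun ab v =>
      if v = "O" then (ab.1 + 1, ab.2)
      else if v = "X" then (ab.1, ab.2 + 1)
      else ab) ab) (0, 0)

-- ===== PORT B =====
def count_alt (board : List (List String)) : Int × Int :=
  let flat := board.flatMap (fun arr => arr)
  ((PySem.List.count flat "O" : Int), (PySem.List.count flat "X" : Int))

-- ===== PRECONDITION & SPEC =====
def Spec_count (board : List (List String)) (out : Int × Int) : Prop := out = count_alt board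
instance (board : List (List String)) (out : Int × Int) : Decidable (Spec_count board out) := by unfold Spec_count; infer_instance

-- ===== CLAIM (what is proved, stated in full; the proofs are below) =====
def Claim_equal_count : Prop := ∀ (board : List (List String)), Dom_count board → Spec_count board (count board)

-- ===== LEMMAS AND PROOFS =====

-- ===== VERDICT (by name: the statement is the Claim_ definition above) =====
lemma count_inner (arr : List String) (a b : Int) :
    arr.foldl (fun ab v =>
      if v = "O" then (ab.1 + 1, ab.2)
      else if v = "X" then (ab.1, ab.2 + 1)
      else ab) (a, b)
    = (a + (PySem.List.count arr "O" : Int), b + (PySem.List.count arr "X" : Int)) := by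
  induction arr generalizing a b with
  | nil => simp [PySem.List.count]
  | cons h t ih =>
    simp only [List.foldl_cons]
    by_cases hO : h = "O"
    · simp [hO, ih, PySem.List.count, List.count_cons]; ring
    · by_cases hX : h = "X"
      · simp [hX, hO, ih, PySem.List.count, List.count_cons]; ring
      · simp [hO, hX, ih, PySem.List.count]

lemma count_outer (board : List (List String)) (a b : Int) :
    board.foldl (fun ab arr =>
      arr.foldl (fun ab v =>
        if v = "O" then (ab.1 + 1, ab.2)
        else if v = "X" then (ab.1, ab.2 + 1)
        else ab) ab) (a, b)
    = (a + (PySem.List.count (board.flatMap (fun arr => arr)) "O" : Int),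
       b + (PySem.List.count (board.flatMap (fun arr => arr)) "X" : Int)) := by
  induction board generalizing a b with
  | nil => simp [PySem.List.count]
  | cons h t ih =>
    simp only [List.foldl_cons, count_inner, ih, List.flatMap_cons, PySem.List.count,
      List.count_append]
    push_cast
    ring_nf

theorem count_spec : Claim_equal_count := by
  intro board _
  unfold Spec_count count count_alt
  simp [count_outer]
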